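-- pv_equiv track=rewrite | github.com/Susderk/pipeline-scripts | Step_02_Generate_Marketing_CSV.py | truncate_hashtag_block
-- ===== SOURCE A (Python) =====
-- def truncate_hashtag_block(hashtags: list, max_chars: int) -> str:
--     result, length = [], 0
--     for tag in hashtags:
--         needed = len(tag) + (1 if result else 0)
--         if length + needed > max_chars:
--             break
--         result.append(tag)
--         length += needed
--     return " ".join(result)
-- ===== SOURCE B (Python) =====
-- def truncate_hashtag_block(hashtags: list, max_chars: int) -> str:
--     # Precompute cumulative joined-lengths, then binary-search the cut point
--     # (valid because the cumulative costs are non-decreasing).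
--     costs = []
--     total = 0
--     for i, tag in enumerate(hashtags):
--         total += len(tag) + (1 if i else 0)
--         costs.append(total)
--     lo, hi = 0, len(costs)
--     while lo < hi:
--         mid = (lo + hi) // 2
--         if costs[mid] <= max_chars:
--             lo = mid + 1
--         else:
--             hi = mid
--     return " ".join(hashtags[:lo])
-- ===== Notes on version B (the rewrite author's own statement) =====
-- stated objective: alternative
-- what changed: B precomputes the list of cumulative joined-lengths and then binary-searches it for the cut point (valid since the cumulative costs are non-decreasing), instead of A's greedy break-on-overflow accumulation of a result list.
import Mathlib
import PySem

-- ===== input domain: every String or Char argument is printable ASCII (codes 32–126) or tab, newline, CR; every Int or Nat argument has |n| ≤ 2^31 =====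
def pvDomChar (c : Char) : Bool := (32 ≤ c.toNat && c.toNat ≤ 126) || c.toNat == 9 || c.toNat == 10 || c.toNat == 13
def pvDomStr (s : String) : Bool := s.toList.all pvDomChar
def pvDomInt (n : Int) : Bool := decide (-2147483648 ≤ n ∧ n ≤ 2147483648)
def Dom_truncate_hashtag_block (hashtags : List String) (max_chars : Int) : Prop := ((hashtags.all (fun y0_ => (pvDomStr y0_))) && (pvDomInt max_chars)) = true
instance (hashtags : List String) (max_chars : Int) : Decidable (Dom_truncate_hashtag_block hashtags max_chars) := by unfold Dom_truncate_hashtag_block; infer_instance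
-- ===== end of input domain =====

-- B precomputes the cumulative joined-lengths and binary-searches them for the cut
-- point (they are non-decreasing), instead of A's greedy break-on-overflow loop.

-- ===== PORT A =====
-- loop over tags with state (result, length); 'break' = return result
def truncAGo (max_chars : Int) : List String → List String → Int → List String
  | [], result, _ => result
  | tag :: ts, result, length =>
      let needed : Int := (PySem.Str.len tag : Int) + (if result.isEmpty then 0 else 1)
      if length + needed > max_chars then result
      else truncAGo max_chars ts (result ++ [tag]) (length + needed)

def truncate_hashtag_block (hashtags : List String) (max_chars : Int) : String :=
  PySem.Str.join " " (truncAGo max_chars hashtags [] 0)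

-- ===== PORT B =====
-- first pass: the list of cumulative costs (state (i, total), appending each total)
def truncBCosts : List String → Nat → Int → List Int
  | [], _, _ => []
  | tag :: ts, i, total =>
      let total' : Int := total + (PySem.Str.len tag : Int) + (if i = 0 then 0 else 1)
      total' :: truncBCosts ts (i + 1) total'

-- binary search: while lo < hi (indices are nonnegative, so Nat; (lo+hi)/2 = Python //);
-- costs[mid] read with getD (mid < hi ≤ len is an invariant of the loop)
def truncBSearch (costs : List Int) (max_chars : Int) (lo hi : Nat) : Nat :=
  if lo < hi then
    let mid : Nat := (lo + hi) / 2
    if costs.getD mid 0 ≤ max_chars then truncBSearch costs max_chars (mid + 1) hi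
    else truncBSearch costs max_chars lo mid
  else lo
termination_by hi - lo
decreasing_by all_goals omega

def truncate_hashtag_block_alt (hashtags : List String) (max_chars : Int) : String :=
  let costs := truncBCosts hashtags 0 0
  PySem.Str.join " " (hashtags.take (truncBSearch costs max_chars 0 costs.length))

-- ===== PRECONDITION & SPEC =====
def Spec_truncate_hashtag_block (hashtags : List String) (max_chars : Int) (out : String) : Prop := out = truncate_hashtag_block_alt hashtags max_chars
instance (hashtags : List String) (max_chars : Int) (out : String) : Decidable (Spec_truncate_hashtag_block hashtags max_chars out) := by unfold Spec_truncate_hashtag_block; infer_instance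

-- ===== CLAIM (what is proved, stated in full; the proofs are below) =====
def Claim_equal_truncate_hashtag_block : Prop := ∀ (hashtags : List String) (max_chars : Int), Dom_truncate_hashtag_block hashtags max_chars → Spec_truncate_hashtag_block hashtags max_chars (truncate_hashtag_block hashtags max_chars)

-- ===== LEMMAS AND PROOFS =====

-- first index of a cost exceeding the budget (the proof's reference cut point)
def fidx (max_chars : Int) : List Int → Nat
  | [] => 0
  | c :: cs => if c > max_chars then 0 else fidx max_chars cs + 1

theorem truncAGo_eq_take (max_chars : Int) (ts : List String) (result : List String)
    (length : Int) (i : Nat) (h : result.isEmpty = decide (i = 0)) :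
    truncAGo max_chars ts result length
      = result ++ ts.take (fidx max_chars (truncBCosts ts i length)) := by
  induction ts generalizing result length i with
  | nil => simp [truncAGo, truncBCosts, fidx]
  | cons t ts ih =>
      simp only [truncAGo, truncBCosts, fidx]
      have hneed : (if result.isEmpty then (0 : Int) else 1) = (if i = 0 then 0 else 1) := by
        rw [h]; by_cases hi : i = 0 <;> simp [hi]
      rw [hneed]
      have harith : length + ((PySem.Str.len t : Int) + (if i = 0 then 0 else 1))
          = length + (PySem.Str.len t : Int) + (if i = 0 then 0 else 1) := by ring
      rw [harith]
      split_ifs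
      all_goals first
        | (rw [ih (result ++ [t]) _ (i + 1) (by simp)]; simp)
        | simp

theorem fidx_le_length (max_chars : Int) (cs : List Int) : fidx max_chars cs ≤ cs.length := by
  induction cs with
  | nil => simp [fidx]
  | cons c cs ih =>
      simp only [fidx, List.length_cons]
      split_ifs <;> omega

theorem fidx_before (max_chars : Int) (cs : List Int) (j : Nat)
    (hj : j < fidx max_chars cs) : cs.getD j 0 ≤ max_chars := by
  induction cs generalizing j with
  | nil => simp [fidx] at hj
  | cons c cs ih =>
      simp only [fidx] at hj
      split_ifs at hj with hc
      · omega
      · cases j with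
        | zero => simpa using le_of_not_gt hc
        | succ j => simpa using ih j (by omega)

theorem truncBCosts_chain (ts : List String) (i : Nat) (total : Int) :
    List.IsChain (· ≤ ·) (total :: truncBCosts ts i total) := by
  induction ts generalizing i total with
  | nil => simp [truncBCosts]
  | cons t ts ih =>
      simp only [truncBCosts]
      have hlen : (0 : Int) ≤ (PySem.Str.len t : Int) := Int.natCast_nonneg _
      exact List.isChain_cons_cons.mpr ⟨by split_ifs <;> omega, ih (i + 1) _⟩

theorem truncBCosts_mono (ts : List String) (i : Nat) (total : Int)
    (j k : Nat) (hjk : j ≤ k) (hk : k < (truncBCosts ts i total).length) :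
    (truncBCosts ts i total).getD j 0 ≤ (truncBCosts ts i total).getD k 0 := by
  have hp : (truncBCosts ts i total).Pairwise (· ≤ ·) :=
    ((List.isChain_iff_pairwise.mp (truncBCosts_chain ts i total)).of_cons)
  rcases Nat.lt_or_ge j k with hlt | hge
  · have hj : j < (truncBCosts ts i total).length := lt_trans hlt hk
    have := (List.pairwise_iff_getElem.mp hp) j k hj hk hlt
    simpa [List.getD, List.getElem?_eq_getElem, hj, hk] using this
  · have : j = k := le_antisymm hjk hge
    simp [this]

theorem fidx_after (max_chars : Int) (ts : List String) (i : Nat) (total : Int) (j : Nat)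
    (hj : fidx max_chars (truncBCosts ts i total) ≤ j)
    (hjl : j < (truncBCosts ts i total).length) :
    (truncBCosts ts i total).getD j 0 > max_chars := by
  set cs := truncBCosts ts i total with hcs
  have hflt : fidx max_chars cs < cs.length := lt_of_le_of_lt hj hjl
  have hatf : cs.getD (fidx max_chars cs) 0 > max_chars := by
    clear_value cs; clear hcs hj hjl
    induction cs with
    | nil => simp at hflt
    | cons c cs ih =>
        simp only [fidx] at hflt ⊢
        split_ifs with hc
        · simpa using hc
        · simp only [if_neg hc, List.length_cons] at hflt
          simpa using ih (by omega)
  have := truncBCosts_mono ts i total (fidx max_chars (truncBCosts ts i total)) j hj hjl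
  rw [← hcs] at this
  omega

theorem truncBSearch_eq (costs : List Int) (max_chars : Int) (g : Nat)
    (hbefore : ∀ j, j < g → costs.getD j 0 ≤ max_chars)
    (hafter : ∀ j, g ≤ j → j < costs.length → costs.getD j 0 > max_chars) :
    ∀ n lo hi, hi - lo ≤ n → lo ≤ g → g ≤ hi → hi ≤ costs.length →
      truncBSearch costs max_chars lo hi = g := by
  intro n
  induction n with
  | zero =>
      intro lo hi hn h1 h2 h3
      rw [truncBSearch]
      have : ¬ lo < hi := by omega
      simp [this]; omega
  | succ n ih =>
      intro lo hi hn h1 h2 h3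
      rw [truncBSearch]
      by_cases hlh : lo < hi
      · simp only [hlh, if_true]
        set mid := (lo + hi) / 2 with hmid
        by_cases hc : costs.getD mid 0 ≤ max_chars
        · simp only [hc, if_true]
          have hmg : mid < g := by
            by_contra hcon
            have := hafter mid (by omega) (by omega)
            omega
          exact ih (mid + 1) hi (by omega) (by omega) h2 h3
        · simp only [hc, if_false]
          have hmg : g ≤ mid := by
            by_contra hcon
            exact hc (hbefore mid (by omega))
          exact ih lo mid (by omega) h1 hmg (by omega)
      · simp [hlh]; omega

-- ===== VERDICT (by name: the statement is the Claim_ definition above) =====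
theorem truncate_hashtag_block_spec : Claim_equal_truncate_hashtag_block := by
  intro hashtags max_chars _
  unfold Spec_truncate_hashtag_block truncate_hashtag_block truncate_hashtag_block_alt
  rw [truncAGo_eq_take max_chars hashtags [] 0 0 (by simp)]
  simp only [List.nil_append]
  congr 1
  congr 1
  exact (truncBSearch_eq (truncBCosts hashtags 0 0) max_chars
    (fidx max_chars (truncBCosts hashtags 0 0))
    (fun j hj => fidx_before _ _ _ hj)
    (fun j hj hjl => fidx_after _ _ _ _ _ hj hjl)
    ((truncBCosts hashtags 0 0).length) 0 _ (by omega) (by omega)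
    (fidx_le_length _ _) (le_refl _)).symm
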